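-- pv_equiv track=rewrite | github.com/carpasgis2/sqlite-analyzer-mcp | sqlite-analyzer/src/db_relationship_graph.py | infer_join_by_convention
-- ===== SOURCE A (Python) =====
-- def infer_join_by_convention(source_table, target_table, source_columns, target_columns):
--     """
--     Infiere la relación entre tablas basándose en convenciones de nombres comunes
--
--     Args:
--         source_table: Tabla de origen
--         target_table: Tabla de destino
--         source_columns: Lista de columnas de la tabla origen
--         target_columns: Lista de columnas de la tabla destino
--
--     Returns:
--         Diccionario con la definición del JOIN
--     """
--     # Buscar columnas que parezcan claves primarias/foráneas
--     source_pk = None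
--     target_pk = None
--     source_id = f"{source_table.lower()}_id"
--     target_id = f"{target_table.lower()}_id"
--
--     # Buscar IDs en columnas de origen
--     for col in source_columns:
--         col_lower = col.lower()
--         if col_lower.endswith("_id") or col_lower == "id":
--             source_pk = col
--             break
--
--     # Buscar en columnas de destino posibles FK que referencian a la tabla origen
--     for col in target_columns:
--         col_lower = col.lower()
--         if col_lower == source_id:
--             target_pk = col
--             break
--         # Buscar también columnas ID genéricas si no hay match específico
--         elif (col_lower.endswith("_id") or col_lower == "id") and not target_pk:
--             target_pk = col
--
--     if source_pk and target_pk: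
--         return {
--             "table": source_table,
--             "column": source_pk,
--             "foreign_table": target_table,
--             "foreign_column": target_pk
--         }
--
--     # Si no encontramos una relación clara, usar convención común "id"
--     return {
--         "table": source_table,
--         "column": "id",
--         "foreign_table": target_table,
--         "foreign_column": f"{source_table.lower()}_id"
--     }
-- ===== SOURCE B (Python) =====
-- def infer_join_by_convention(source_table, target_table, source_columns, target_columns):
--     source_id = source_table.lower() + "_id"
--
--     def is_id_like(col):
--         l = col.lower()
--         return l.endswith("_id") or l == "id"
--
--     # single scans via generator short-circuit: first id-like source column
--     source_pk = next((c for c in source_columns if is_id_like(c)), None)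
--     # prioritized target: first exact FK match, otherwise first generic id column
--     target_pk = next((c for c in target_columns if c.lower() == source_id), None)
--     if target_pk is None:
--         target_pk = next((c for c in target_columns if is_id_like(c)), None)
--
--     if source_pk and target_pk:
--         return {
--             "table": source_table,
--             "column": source_pk,
--             "foreign_table": target_table,
--             "foreign_column": target_pk
--         }
--     return {
--         "table": source_table,
--         "column": "id",
--         "foreign_table": target_table,
--         "foreign_column": source_table.lower() + "_id"
--     }
-- ===== Notes on version B (the rewrite author's own statement) =====
-- stated objective: simpler
-- what changed: A's single target-column loop that carries a mutable fallback flag ('first exact match breaks, first generic id remembered otherwise') is replaced by two independent prioritized first-match scans (exact FK match first, generic id scan only if that fails), and both column searches become single next()/find-style scans.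
import Mathlib
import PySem

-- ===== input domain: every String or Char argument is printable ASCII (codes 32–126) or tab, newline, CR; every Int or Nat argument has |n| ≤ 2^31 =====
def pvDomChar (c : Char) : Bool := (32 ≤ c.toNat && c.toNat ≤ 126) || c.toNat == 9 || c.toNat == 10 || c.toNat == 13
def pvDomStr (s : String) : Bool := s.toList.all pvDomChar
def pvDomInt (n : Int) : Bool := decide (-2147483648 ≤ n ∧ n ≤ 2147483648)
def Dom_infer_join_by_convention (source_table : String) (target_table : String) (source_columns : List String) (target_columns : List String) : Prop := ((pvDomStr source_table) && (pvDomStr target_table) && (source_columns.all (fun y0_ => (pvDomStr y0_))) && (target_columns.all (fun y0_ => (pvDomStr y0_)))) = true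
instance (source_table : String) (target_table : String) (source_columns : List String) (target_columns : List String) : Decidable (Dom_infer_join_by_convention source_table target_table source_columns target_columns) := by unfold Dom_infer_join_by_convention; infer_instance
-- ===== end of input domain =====

-- B replaces A's one-pass target loop with a mutable fallback slot by two independent
-- prioritized first-match scans (exact FK name first, then generic id); objective: simpler.

-- ===== PORT A =====
-- Python truthiness of an Optional[str]: None and "" are falsy.
def strOptTruthy (o : Option String) : Bool :=
  match o with
  | some s => !(s == "")
  | none => false

-- 'for col in source_columns: ... break' — first id-like column.
def aSourceLoop : List String → Option String
  | [] => none
  | col :: rest =>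
    let col_lower := PySem.Str.lower col
    if PySem.Str.endswith col_lower "_id" || (col_lower == "id") then some col
    else aSourceLoop rest

-- 'for col in target_columns: ...' carrying the mutable target_pk.
def aTargetLoop (source_id : String) : List String → Option String → Option String
  | [], target_pk => target_pk
  | col :: rest, target_pk =>
    let col_lower := PySem.Str.lower col
    if col_lower == source_id then some col
    else if (PySem.Str.endswith col_lower "_id" || (col_lower == "id")) && !(strOptTruthy target_pk) then
      aTargetLoop source_id rest (some col)
    else
      aTargetLoop source_id rest target_pk

def infer_join_by_convention (source_table : String) (target_table : String) (source_columns : List String) (target_columns : List String) : List (String × String) :=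
  let source_id := PySem.Str.lower source_table ++ "_id"
  let _target_id := PySem.Str.lower target_table ++ "_id"
  let source_pk := aSourceLoop source_columns
  let target_pk := aTargetLoop source_id target_columns none
  if strOptTruthy source_pk && strOptTruthy target_pk then
    [("table", source_table), ("column", source_pk.getD ""),
     ("foreign_table", target_table), ("foreign_column", target_pk.getD "")]
  else
    [("table", source_table), ("column", "id"),
     ("foreign_table", target_table), ("foreign_column", PySem.Str.lower source_table ++ "_id")]

-- ===== PORT B =====
-- is_id_like(col)
def bIdLike (col : String) : Bool :=
  let l := PySem.Str.lower col
  PySem.Str.endswith l "_id" || (l == "id")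

def infer_join_by_convention_alt (source_table : String) (target_table : String) (source_columns : List String) (target_columns : List String) : List (String × String) :=
  let source_id := PySem.Str.lower source_table ++ "_id"
  let source_pk := source_columns.find? bIdLike
  let target_pk :=
    match target_columns.find? (fun c => PySem.Str.lower c == source_id) with
    | some c => some c
    | none => target_columns.find? bIdLike
  if strOptTruthy source_pk && strOptTruthy target_pk then
    [("table", source_table), ("column", source_pk.getD ""),
     ("foreign_table", target_table), ("foreign_column", target_pk.getD "")]
  else
    [("table", source_table), ("column", "id"),
     ("foreign_table", target_table), ("foreign_column", PySem.Str.lower source_table ++ "_id")]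

-- ===== PRECONDITION & SPEC =====
def Spec_infer_join_by_convention (source_table : String) (target_table : String) (source_columns : List String) (target_columns : List String) (out : List (String × String)) : Prop := out = infer_join_by_convention_alt source_table target_table source_columns target_columns
instance (source_table : String) (target_table : String) (source_columns : List String) (target_columns : List String) (out : List (String × String)) : Decidable (Spec_infer_join_by_convention source_table target_table source_columns target_columns out) := by unfold Spec_infer_join_by_convention; infer_instance

-- ===== CLAIM (what is proved, stated in full; the proofs are below) =====
def Claim_equal_infer_join_by_convention : Prop := ∀ (source_table : String) (target_table : String) (source_columns : List String) (target_columns : List String), Dom_infer_join_by_convention source_table target_table source_columns target_columns → Spec_infer_join_by_convention source_table target_table source_columns target_columns (infer_join_by_convention source_table target_table source_columns target_columns)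

-- ===== LEMMAS AND PROOFS =====

theorem bIdLike_def (c : String) :
    (PySem.Str.endswith (PySem.Str.lower c) "_id" || (PySem.Str.lower c == "id")) = bIdLike c := rfl

-- An id-like column is nonempty, so it is Python-truthy.
theorem idLike_ne_empty (c : String) (h : bIdLike c = true) : (c == "") = false := by
  by_cases hc : c = ""
  · subst hc; exact absurd h (by decide)
  · simp [hc]

theorem aSourceLoop_eq_find (cols : List String) : aSourceLoop cols = cols.find? bIdLike := by
  induction cols with
  | nil => rfl
  | cons col rest ih =>
    simp only [aSourceLoop, bIdLike_def, List.find?]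
    by_cases h : bIdLike col = true
    · simp only [h]
      rw [if_pos trivial]
    · rw [Bool.not_eq_true] at h
      simp only [h]
      exact ih

-- A's fallback-carrying loop equals: first exact match, else the incoming truthy state, else first generic.
theorem aTargetLoop_eq (sid : String) (cols : List String) (tpk : Option String)
    (hinv : tpk = none ∨ ∃ c, tpk = some c ∧ bIdLike c = true) :
    aTargetLoop sid cols tpk =
      match cols.find? (fun c => PySem.Str.lower c == sid) with
      | some e => some e
      | none => tpk.orElse (fun _ => cols.find? bIdLike) := by
  induction cols generalizing tpk with
  | nil => cases tpk <;> simp [aTargetLoop, Option.orElse]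
  | cons col rest ih =>
    simp only [aTargetLoop, bIdLike_def, List.find?]
    by_cases hex : (PySem.Str.lower col == sid) = true
    · simp only [hex]
      rw [if_pos trivial]
    · rw [Bool.not_eq_true] at hex
      simp only [hex]
      by_cases hgen : bIdLike col = true
      · rcases hinv with h0 | ⟨c, hc, hcg⟩
        · subst h0
          simp only [hgen, strOptTruthy, Bool.not_false, Bool.and_true,
            ih (some col) (Or.inr ⟨col, rfl, hgen⟩)]
          cases hf : rest.find? (fun c => PySem.Str.lower c == sid) <;> simp [Option.orElse]
        · subst hc
          simp only [hgen, strOptTruthy, idLike_ne_empty c hcg, Bool.not_false]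
          rw [if_neg (by simp), ih (some c) (Or.inr ⟨c, rfl, hcg⟩)]
          cases hf : rest.find? (fun c => PySem.Str.lower c == sid) <;> simp [Option.orElse]
      · rw [Bool.not_eq_true] at hgen
        simp only [hgen, Bool.false_and]
        rw [if_neg (by simp), ih tpk hinv]
        cases tpk <;> cases hf : rest.find? (fun c => PySem.Str.lower c == sid) <;>
          simp [Option.orElse]

-- ===== VERDICT (by name: the statement is the Claim_ definition above) =====
theorem infer_join_by_convention_spec : Claim_equal_infer_join_by_convention := by
  intro st tt scols tcols _
  unfold Spec_infer_join_by_convention infer_join_by_convention infer_join_by_convention_alt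
  simp only [aSourceLoop_eq_find, aTargetLoop_eq _ _ none (Or.inl rfl)]
  cases hf : tcols.find? (fun c => PySem.Str.lower c == (PySem.Str.lower st ++ "_id")) <;>
    simp [Option.orElse]
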